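-- pv_equiv track=rewrite | github.com/nsadeh/Daily-Problem | problem_28.py | interspace
-- ===== SOURCE A (Python) =====
-- def interspace(word, k):
--     """
--     Inter-space word until len(word) == k.
--
--     Inter-spacing is done from the left to
--     right striving for an equal number of spaces
--     between words. No space is added in beginning or end.
--
--     Example:
--     > case = "fox jumps over"
--     > interspace(case, k=16)
--     "fox  jumps  over"  # two spaces between "fox" and "jumps" and "jumps" and "over"
--
--     :param word: str containing words separated by single spaces
--     :param k: int length of final line
--     :return: str words in word of length k with inter-spacing
--     """
--     separated = word.split(" ")
--     length = len(word)
--     index = 0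
--     while length < k:
--         separated[index] = separated[index] + " "
--         length += 1
--         index = (index + 1) % (len(separated) - 1)
--     return " ".join(separated)
-- ===== SOURCE B (Python) =====
-- def interspace(word, k):
--     parts = word.split(" ")
--     gaps = len(parts) - 1
--     total = k - len(word)
--     if total <= 0 or gaps == 0:
--         return word
--     q, r = divmod(total, gaps)
--     pieces = []
--     for i, p in enumerate(parts[:-1]):
--         pieces.append(p)
--         pieces.append(" " * (1 + q + (1 if i < r else 0)))
--     pieces.append(parts[-1])
--     return "".join(pieces)
-- ===== Notes on version B (the rewrite author's own statement) =====
-- stated objective: faster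
-- what changed: A pads by looping k-len(word) times, appending one space per iteration round-robin over the gaps; B computes each gap's space count in closed form with divmod and builds the result in a single pass over the words.
import Mathlib
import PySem

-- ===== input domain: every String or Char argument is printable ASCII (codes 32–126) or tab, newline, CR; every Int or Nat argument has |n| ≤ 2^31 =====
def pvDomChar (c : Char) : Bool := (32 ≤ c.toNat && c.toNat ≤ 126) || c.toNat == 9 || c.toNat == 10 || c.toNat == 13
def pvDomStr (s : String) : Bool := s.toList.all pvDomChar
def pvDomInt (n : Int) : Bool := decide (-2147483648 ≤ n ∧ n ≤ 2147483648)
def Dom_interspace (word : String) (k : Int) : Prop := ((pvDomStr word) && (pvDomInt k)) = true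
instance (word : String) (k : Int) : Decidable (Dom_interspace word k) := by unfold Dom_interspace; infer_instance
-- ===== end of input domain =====

-- B replaces A's one-space-per-iteration round-robin loop by a closed-form divmod space count
-- per gap and a single pass over the words; equivalence is about the return value.

-- ===== PORT A =====
-- A's while loop: `while length < k: separated[index] += " "; length += 1; index = (index+1) % (len(separated)-1)`
-- (index is always in range whenever the loop runs inside Pre_, so `getD`/`set` are exact there)
def interspaceGo (sep : List (List Char)) (length k : Int) (index : Nat) : List (List Char) :=
  if length < k then
    interspaceGo (sep.set index ((sep.getD index []) ++ [' '])) (length + 1) k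
      ((index + 1) % (sep.length - 1))
  else sep
termination_by (k - length).toNat
decreasing_by omega

def interspace (word : String) (k : Int) : String :=
  let separated := PySem.Chars.splitOn word.toList [' ']
  let length : Int := word.toList.length
  String.ofList (PySem.Chars.join [' '] (interspaceGo separated length k 0))

-- ===== PORT B =====
def interspace_alt (word : String) (k : Int) : String :=
  let parts := PySem.Chars.splitOn word.toList [' ']
  let gaps : Int := (parts.length : Int) - 1
  let total : Int := k - (word.toList.length : Int)
  if total ≤ 0 ∨ gaps = 0 then word
  else
    let q := PySem.Int.floordiv total gaps
    let r := PySem.Int.mod total gaps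
    let pieces := (PySem.List.enumerate parts.dropLast).foldl
      (fun acc x =>
        acc ++ [x.2, PySem.List.pyRepeat [' '] (1 + q + (if x.1 < r then 1 else 0))]) []
    String.ofList (PySem.Chars.join [] (pieces ++ [parts.getLastD []]))

-- ===== PRECONDITION & SPEC =====
-- Pre_ excludes exactly the inputs where A raises ZeroDivisionError: a word with no space that
-- still needs padding (len(word) < k makes the loop run and `% (len(separated)-1)` divide by 0).
def Pre_interspace (word : String) (k : Int) : Prop :=
  k ≤ (word.toList.length : Int) ∨ ' ' ∈ word.toList
instance (word : String) (k : Int) : Decidable (Pre_interspace word k) := by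
  unfold Pre_interspace; infer_instance

def pvWitness_interspace : String × Int := ("fox jumps over", 16)

def Spec_interspace (word : String) (k : Int) (out : String) : Prop := out = interspace_alt word k
instance (word : String) (k : Int) (out : String) : Decidable (Spec_interspace word k out) := by
  unfold Spec_interspace; infer_instance

-- ===== CLAIM (what is proved, stated in full; the proofs are below) =====
def Claim_equal_interspace : Prop := ∀ (word : String) (k : Int), Dom_interspace word k → Pre_interspace word k → Spec_interspace word k (interspace word k)

-- ===== LEMMAS AND PROOFS =====

-- a simple structural recursion equal to `PySem.Chars.splitOn cs [' ']` (proof-side only)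
def mySplit : List Char → List (List Char)
  | [] => [[]]
  | c :: rest =>
    if c = ' ' then [] :: mySplit rest
    else
      match mySplit rest with
      | p :: ps => (c :: p) :: ps
      | [] => [[c]]

theorem mySplit_ne_nil (cs : List Char) : mySplit cs ≠ [] := by
  induction cs with
  | nil => simp [mySplit]
  | cons c rest ih =>
    simp only [mySplit]
    split
    · simp
    · split
      · simp
      · simp

theorem splitOn_go_eq (fuel : Nat) : ∀ (l cur : List Char) (acc : List (List Char)),
    l.length ≤ fuel →
    PySem.Chars.splitOn.go [' '] fuel l cur acc
      = acc.reverse ++ (mySplit l).modifyHead (cur.reverse ++ ·) := by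
  induction fuel with
  | zero =>
    intro l cur acc h
    have : l = [] := by cases l <;> simp_all
    subst this
    simp [PySem.Chars.splitOn.go, mySplit]
  | succ n ih =>
    intro l cur acc h
    cases l with
    | nil => simp [PySem.Chars.splitOn.go, mySplit]
    | cons c rest =>
      simp only [PySem.Chars.splitOn.go]
      by_cases hc : c = ' '
      · subst hc
        rw [if_pos (by simp [List.isPrefixOf])]
        have hd : List.drop [' '].length (' ' :: rest) = rest := rfl
        rw [hd, ih rest [] _ (by simpa using h)]
        have hmh : List.modifyHead (fun x => ([] : List Char).reverse ++ x) (mySplit rest) = mySplit rest := by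
          cases mySplit rest <;> simp
        simp only [hmh, mySplit]
        simp
      · rw [if_neg (by simp [List.isPrefixOf]; exact fun h' => hc h'.symm)]
        rw [ih rest (c :: cur) acc (by simpa using h)]
        simp only [mySplit, if_neg hc]
        rcases hsp : mySplit rest with _ | ⟨p, ps⟩
        · exact absurd hsp (mySplit_ne_nil rest)
        · simp

theorem splitOn_eq_mySplit (cs : List Char) :
    PySem.Chars.splitOn cs [' '] = mySplit cs := by
  rw [PySem.Chars.splitOn, splitOn_go_eq (cs.length + 1) cs [] [] (by omega)]
  have h1 : List.modifyHead (fun x => ([] : List Char) ++ x) (mySplit cs) = mySplit cs := by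
    cases mySplit cs <;> simp
  simpa using h1

theorem join_cons' (p : List Char) (ps : List (List Char)) :
    PySem.Chars.join [' '] (p :: ps) = p ++ (if ps = [] then [] else ' ' :: PySem.Chars.join [' '] ps) := by
  cases ps with
  | nil => simp [PySem.Chars.join, List.intercalate]
  | cons q qs => rw [PySem.Chars.join_cons_cons]; simp

theorem join_mySplit (cs : List Char) :
    PySem.Chars.join [' '] (mySplit cs) = cs := by
  induction cs with
  | nil => simp [mySplit, PySem.Chars.join, List.intercalate]
  | cons c rest ih =>
    simp only [mySplit]
    by_cases hc : c = ' '
    · subst hc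
      rw [if_pos rfl, join_cons' [] (mySplit rest), if_neg (mySplit_ne_nil rest)]
      simpa using ih
    · rw [if_neg hc]
      rcases hsp : mySplit rest with _ | ⟨p, ps⟩
      · exact absurd hsp (mySplit_ne_nil rest)
      · rw [hsp] at ih
        rw [join_cons'] at ih ⊢
        simpa using ih

theorem two_le_mySplit_length (cs : List Char) (h : ' ' ∈ cs) :
    2 ≤ (mySplit cs).length := by
  induction cs with
  | nil => simp at h
  | cons c rest ih =>
    simp only [mySplit]
    by_cases hc : c = ' '
    · rw [if_pos hc]
      have := mySplit_ne_nil rest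
      cases hsp : mySplit rest <;> simp_all
    · rw [if_neg hc]
      have hm : ' ' ∈ rest := by
        rcases List.mem_cons.mp h with h' | h'
        · exact absurd h'.symm hc
        · exact h'
      rcases hsp : mySplit rest with _ | ⟨p, ps⟩
      · exact absurd hsp (mySplit_ne_nil rest)
      · have := ih hm; rw [hsp] at this; simpa using this

-- number of iterations among the first `fuel` (starting at gap `idx`) that land on gap `i`
def cnt (g idx i fuel : Nat) : Nat :=
  (List.range fuel).countP (fun j => (idx + j) % g == i)

theorem cnt_succ (g idx i n : Nat) (hidx : idx < g) :
    cnt g idx i (n + 1) = (if i = idx then 1 else 0) + cnt g ((idx + 1) % g) i n := by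
  unfold cnt
  rw [List.range_succ_eq_map, List.countP_cons, List.countP_map]
  have h1 : ∀ j : Nat, (idx + (j + 1)) % g = ((idx + 1) % g + j) % g := by
    intro j
    conv_lhs => rw [show idx + (j + 1) = (idx + 1) + j by ring, Nat.add_mod]
    conv_rhs => rw [Nat.add_mod]
    simp
  have h2 : List.countP ((fun j => (idx + j) % g == i) ∘ Nat.succ) (List.range n)
      = List.countP (fun j => ((idx + 1) % g + j) % g == i) (List.range n) := by
    apply List.countP_congr
    intro j _
    simpa using congrArg (fun m => m == i) (h1 j)
  rw [h2]
  simp only [Nat.add_zero, Nat.mod_eq_of_lt hidx]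
  by_cases h : i = idx
  · simp [h, Nat.add_comm]
  · have h' : ¬ idx = i := fun hh => h hh.symm
    simp [h, h']

theorem cnt_closed (g i T : Nat) (hg : 0 < g) :
    cnt g 0 i T = if i < g then T / g + (if i < T % g then 1 else 0) else 0 := by
  induction T with
  | zero => simp [cnt, Nat.zero_div, Nat.zero_mod]
  | succ T ih =>
    unfold cnt at *
    rw [List.range_succ, List.countP_append, ih]
    simp only [List.countP_cons, List.countP_nil]
    have hdm := Nat.div_add_mod T g
    have hml : T % g < g := Nat.mod_lt _ hg
    by_cases hlast : T % g = g - 1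
    · have he1 : T + 1 = g * (T / g) + g := by omega
      have he2 : T + 1 = (T / g + 1) * g := by rw [he1]; ring
      have hdiv : (T + 1) / g = T / g + 1 := by
        rw [he2, Nat.mul_div_cancel _ hg]
      have hmod : (T + 1) % g = 0 := by
        rw [he2]; simp [Nat.mul_mod_left]
      rw [hdiv, hmod]
      by_cases hi : i < g <;> by_cases he : T % g = i <;> by_cases hlt : i < T % g <;>
        simp [hi, he, hlt] <;> omega
    · have hdiv : (T + 1) / g = T / g := by
        have h1 : T + 1 = g * (T / g) + (T % g + 1) := by omega
        rw [h1, Nat.mul_add_div hg]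
        have h2 : (T % g + 1) / g = 0 := Nat.div_eq_of_lt (by omega)
        omega
      have hmod : (T + 1) % g = T % g + 1 := by
        have h1 : T + 1 = g * (T / g) + (T % g + 1) := by omega
        rw [h1, Nat.mul_add_mod]
        exact Nat.mod_eq_of_lt (by omega)
      rw [hdiv, hmod]
      by_cases hi : i < g <;> by_cases he : T % g = i <;> by_cases hlt : i < T % g <;>
        simp [hi, he, hlt] <;> omega

theorem interspaceGo_char (g : Nat) (hg : 1 ≤ g) :
    ∀ (n : Nat) (sep : List (List Char)) (length k : Int) (idx : Nat),
      (k - length).toNat = n → sep.length = g + 1 → idx < g →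
      interspaceGo sep length k idx
        = sep.mapIdx (fun i t => t ++ List.replicate (cnt g idx i n) ' ') := by
  intro n
  induction n with
  | zero =>
    intro sep length k idx hn hlen hidx
    rw [interspaceGo, if_neg (by omega)]
    apply List.ext_getElem (by simp)
    intro i h1 h2
    simp [cnt]
  | succ n ih =>
    intro sep length k idx hn hlen hidx
    rw [interspaceGo, if_pos (by omega)]
    have hset : (sep.set idx ((sep.getD idx []) ++ [' '])).length = g + 1 := by
      simp [hlen]
    have hmod : (idx + 1) % (sep.length - 1) = (idx + 1) % g := by rw [hlen]; simp
    rw [hmod, ih _ (length + 1) k _ (by omega) hset (Nat.mod_lt _ (by omega))]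
    apply List.ext_getElem (by simp)
    intro i h1 h2
    simp only [List.getElem_mapIdx]
    rw [cnt_succ g idx i n hidx]
    by_cases hi : i = idx
    · subst hi
      rw [List.getElem_set_self (by simp_all), List.getD_eq_getElem sep [] (by simp_all)]
      rw [if_pos rfl, Nat.add_comm 1 (cnt g ((i + 1) % g) i n)]
      simp only [List.append_assoc]
      congr 1
    · rw [List.getElem_set_ne (by omega)]
      simp [hi]

theorem join_enumerate (parts : List (List Char)) (hne : parts ≠ []) :
    ∀ (s : Int) (f : Nat → Nat) (h : Int → Nat),
      f (parts.length - 1) = 0 →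
      (∀ i : Nat, i + 1 < parts.length → h (s + i) = f i + 1) →
      PySem.Chars.join [' '] (parts.mapIdx (fun i t => t ++ List.replicate (f i) ' '))
        = (PySem.List.enumerate parts.dropLast s).flatMap
            (fun x => x.2 ++ List.replicate (h x.1) ' ') ++ parts.getLastD [] := by
  induction parts with
  | nil => exact absurd rfl hne
  | cons p rest ih =>
    intro s f h hlast hfh
    cases rest with
    | nil =>
      simp only [List.length_cons, List.length_nil] at hlast
      simp [hlast]
    | cons q qs =>
      have hl : List.mapIdx (fun i t => t ++ List.replicate (f i) ' ') (p :: q :: qs)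
          = (p ++ List.replicate (f 0) ' ')
            :: List.mapIdx (fun i t => t ++ List.replicate (f (i + 1)) ' ') (q :: qs) := by
        simp [List.mapIdx_cons]
      rw [hl]
      have hmap_ne : List.mapIdx (fun i t => t ++ List.replicate (f (i + 1)) ' ') (q :: qs) ≠ [] := by
        simp
      rw [join_cons' _ _, if_neg hmap_ne]
      rw [ih (by simp) (s + 1) (fun i => f (i + 1)) h
        (by simpa using hlast)
        (by
          intro i hi
          have := hfh (i + 1) (by simpa using hi)
          push_cast at this ⊢
          rw [show s + 1 + (i : Int) = s + ((i : Int) + 1) by ring]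
          exact this)]
      have hdrop : (p :: q :: qs).dropLast = p :: (q :: qs).dropLast := by simp
      rw [hdrop, PySem.List.enumerate_cons, List.flatMap_cons]
      have hh0 : h s = f 0 + 1 := by
        have := hfh 0 (by simp)
        simpa using this
      rw [hh0]
      have hgl : (p :: q :: qs).getLastD [] = (q :: qs).getLastD [] := by
        simp
      rw [hgl]
      simp [List.replicate_succ', List.append_assoc]

theorem join_nil_flatten (l : List (List Char)) : PySem.Chars.join [] l = l.flatten := by
  simp only [PySem.Chars.join, List.intercalate]
  induction l with
  | nil => simp
  | cons a t ih =>
    cases t with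
    | nil => simp
    | cons b u => simpa [List.intersperse] using ih

theorem flatten_flatMap_pair {α β : Type} (a b : α → List β) (l : List α) :
    (l.flatMap (fun x => [a x, b x])).flatten = l.flatMap (fun x => a x ++ b x) := by
  induction l with
  | nil => simp
  | cons x t ih => simp [ih]

-- ===== VERDICT (by name: the statement is the Claim_ definition above) =====
theorem interspace_spec : Claim_equal_interspace := by
  intro word k _ hpre
  unfold Spec_interspace interspace interspace_alt
  simp only [splitOn_eq_mySplit]
  set cs := word.toList with hcs
  by_cases htot : k - (cs.length : Int) ≤ 0
  · -- no padding needed: A's loop does not run, B takes the guard branch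
    rw [interspaceGo, if_neg (by omega), if_pos (Or.inl htot), join_mySplit]
    exact String.ofList_toList
  · -- padding: A distributes k - len spaces round-robin, B computes the counts in closed form
    have hsp : ' ' ∈ cs := by
      rcases hpre with h | h
      · rw [← hcs] at h; omega
      · exact h
    have h2 := two_le_mySplit_length cs hsp
    set parts := mySplit cs with hparts
    set g : Nat := parts.length - 1 with hgdef
    have hg : 1 ≤ g := by omega
    have hlen : parts.length = g + 1 := by omega
    set T : Nat := (k - (cs.length : Int)).toNat with hT
    have hTpos : 0 < T := by omega
    have hkT : (k - (cs.length : Int)) = (T : Int) := by omega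
    rw [if_neg (by push_cast [hlen]; omega)]
    rw [interspaceGo_char g hg T parts (cs.length : Int) k 0 (by omega) hlen (by omega)]
    rw [PySem.List.foldl_append_eq_flatMap, List.nil_append, join_nil_flatten,
      List.flatten_append]
    have hq : PySem.Int.floordiv (k - (cs.length : Int)) ((parts.length : Int) - 1)
        = ((T / g : Nat) : Int) := by
      rw [hkT, show ((parts.length : Int) - 1) = ((g : Nat) : Int) by push_cast [hlen]; ring]
      exact PySem.Int.floordiv_natCast T g
    have hr : PySem.Int.mod (k - (cs.length : Int)) ((parts.length : Int) - 1)
        = ((T % g : Nat) : Int) := by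
      rw [hkT, show ((parts.length : Int) - 1) = ((g : Nat) : Int) by push_cast [hlen]; ring]
      exact PySem.Int.mod_natCast T g
    rw [hq, hr, flatten_flatMap_pair]
    simp only [PySem.List.pyRepeat_singleton]
    rw [join_enumerate parts (mySplit_ne_nil cs) 0
      (fun i => cnt g 0 i T)
      (fun z => (1 + ((T / g : Nat) : Int) + (if z < ((T % g : Nat) : Int) then 1 else 0)).toNat)
      (by
        show cnt g 0 (parts.length - 1) T = 0
        rw [hlen]; simp only [Nat.add_sub_cancel]; rw [cnt_closed g g T (by omega)]; simp)
      (by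
        intro i hi
        show (1 + ((T / g : Nat) : Int) + (if (0 : Int) + (i : Nat) < ((T % g : Nat) : Int) then 1 else 0)).toNat
          = cnt g 0 i T + 1
        have hig : i < g := by omega
        rw [cnt_closed g i T (by omega), if_pos hig]
        simp only [Int.zero_add]
        by_cases hlt : i < T % g
        · rw [if_pos (by exact_mod_cast hlt), if_pos hlt]
          generalize T / g = m
          omega
        · rw [if_neg (by exact_mod_cast hlt), if_neg hlt]
          generalize T / g = m
          omega)]
    simp
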